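-- pv_equiv track=rewrite | github.com/kkdub/skill-scan | src/skill_scan/_ast_rot13.py | is_rot13_pair
-- ===== SOURCE A (Python) =====
-- def is_rot13_pair(from_str: str, to_str: str) -> bool:
--     """Check whether (from_str, to_str) forms a ROT13 substitution mapping.
--
--     A valid ROT13 pair maps every letter in from_str to its ROT13 counterpart
--     at the same position in to_str, and vice versa. Both strings must have the
--     same length and, considering only alphabetic characters, must cover at
--     least 26 distinct letters (a full alphabet) in each of from_str and to_str.
--     """
--     if len(from_str) != len(to_str) or len(from_str) < 26:
--         return False
--     if not _has_full_alphabet(from_str) or not _has_full_alphabet(to_str):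
--         return False
--     return all(
--         _rot13_char(fc) == tc
--         for fc, tc in zip(from_str, to_str, strict=False)
--         if fc.isalpha() and tc.isalpha()
--     )
--
-- def _has_full_alphabet(s: str) -> bool:
--     """Check that s contains at least 26 distinct alphabetic characters (case-insensitive)."""
--     return len({ch.lower() for ch in s if ch.isalpha()}) >= 26
--
-- def _rot13_char(c: str) -> str:
--     """Apply ROT13 to a single alphabetic character."""
--     if "a" <= c <= "z":
--         return chr((ord(c) - ord("a") + 13) % 26 + ord("a"))
--     if "A" <= c <= "Z":
--         return chr((ord(c) - ord("A") + 13) % 26 + ord("A"))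
--     return c
-- ===== SOURCE B (Python) =====
-- def is_rot13_pair(from_str: str, to_str: str) -> bool:
--     if len(from_str) != len(to_str) or len(from_str) < 26:
--         return False
--     from_seen: set[str] = set()
--     to_seen: set[str] = set()
--     mapping_ok = True
--     for fc, tc in zip(from_str, to_str, strict=False):
--         fa = fc.isalpha()
--         ta = tc.isalpha()
--         if fa:
--             from_seen.add(fc.lower())
--         if ta:
--             to_seen.add(tc.lower())
--         if fa and ta and _rot13_char(fc) != tc:
--             mapping_ok = False
--     return len(from_seen) >= 26 and len(to_seen) >= 26 and mapping_ok
--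
--
-- def _rot13_char(c: str) -> str:
--     if "a" <= c <= "z":
--         return chr((ord(c) - ord("a") + 13) % 26 + ord("a"))
--     if "A" <= c <= "Z":
--         return chr((ord(c) - ord("A") + 13) % 26 + ord("A"))
--     return c
-- ===== Notes on version B (the rewrite author's own statement) =====
-- stated objective: alternative
-- what changed: B fuses A's three separate traversals (two set-comprehension alphabet checks plus a zip generator with all()) into one single pass over zip(from_str, to_str) that accumulates both alphabet sets and the mapping flag together.
import Mathlib
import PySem

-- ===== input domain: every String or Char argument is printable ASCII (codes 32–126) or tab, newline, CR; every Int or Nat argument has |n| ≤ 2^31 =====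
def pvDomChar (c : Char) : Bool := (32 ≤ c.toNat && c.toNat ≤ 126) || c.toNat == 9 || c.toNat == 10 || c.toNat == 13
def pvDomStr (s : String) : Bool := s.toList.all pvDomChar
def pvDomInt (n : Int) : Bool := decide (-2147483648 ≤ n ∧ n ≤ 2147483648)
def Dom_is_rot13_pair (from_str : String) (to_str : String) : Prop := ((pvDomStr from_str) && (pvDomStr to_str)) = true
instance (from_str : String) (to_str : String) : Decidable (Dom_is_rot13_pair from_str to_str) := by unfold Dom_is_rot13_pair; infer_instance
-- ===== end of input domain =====

-- B fuses A's three separate traversals (two alphabet-set passes and a zip/all pass) into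
-- one single accumulating pass over the zipped pair; same O(n) cost, different decomposition.

-- ===== PORT A =====

-- _rot13_char: exact port (chr/ord arithmetic on the ASCII letter ranges)
def pvRot13 (c : Char) : Char :=
  if 'a' ≤ c ∧ c ≤ 'z' then Char.ofNat ((c.toNat - 97 + 13) % 26 + 97)
  else if 'A' ≤ c ∧ c ≤ 'Z' then Char.ofNat ((c.toNat - 65 + 13) % 26 + 65)
  else c

-- _has_full_alphabet: the set comprehension {ch.lower() for ch in s if ch.isalpha()}
def pvHasFull (s : List Char) : Bool :=
  decide (26 ≤ (PySem.Set.ofList ((s.filter PySem.Chars.isalpha).map PySem.Chars.lowerChar)).length)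

def is_rot13_pair (from_str : String) (to_str : String) : Bool :=
  let lf := from_str.toList
  let lt := to_str.toList
  if lf.length ≠ lt.length ∨ lf.length < 26 then false
  else if ¬ pvHasFull lf = true ∨ ¬ pvHasFull lt = true then false
  else (lf.zip lt).all (fun p =>
    if PySem.Chars.isalpha p.1 && PySem.Chars.isalpha p.2 then pvRot13 p.1 == p.2 else true)

-- ===== PORT B =====

-- one step of B's fused loop: update both seen-sets and the mapping flag
def pvStepB (acc : PySem.Set Char × PySem.Set Char × Bool) (p : Char × Char) :
    PySem.Set Char × PySem.Set Char × Bool :=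
  let fs := if PySem.Chars.isalpha p.1 then PySem.Set.add acc.1 (PySem.Chars.lowerChar p.1) else acc.1
  let ts := if PySem.Chars.isalpha p.2 then PySem.Set.add acc.2.1 (PySem.Chars.lowerChar p.2) else acc.2.1
  let ok := if PySem.Chars.isalpha p.1 && PySem.Chars.isalpha p.2 && (pvRot13 p.1 != p.2) then false else acc.2.2
  (fs, ts, ok)

def is_rot13_pair_alt (from_str : String) (to_str : String) : Bool :=
  let lf := from_str.toList
  let lt := to_str.toList
  if lf.length ≠ lt.length ∨ lf.length < 26 then false
  else
    let st := (lf.zip lt).foldl pvStepB (PySem.Set.empty, PySem.Set.empty, true)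
    decide (26 ≤ st.1.length) && decide (26 ≤ st.2.1.length) && st.2.2

-- ===== PRECONDITION & SPEC =====
def Spec_is_rot13_pair (from_str : String) (to_str : String) (out : Bool) : Prop := out = is_rot13_pair_alt from_str to_str
instance (from_str : String) (to_str : String) (out : Bool) : Decidable (Spec_is_rot13_pair from_str to_str out) := by unfold Spec_is_rot13_pair; infer_instance

-- ===== CLAIM (what is proved, stated in full; the proofs are below) =====
def Claim_equal_is_rot13_pair : Prop := ∀ (from_str : String) (to_str : String), Dom_is_rot13_pair from_str to_str → Spec_is_rot13_pair from_str to_str (is_rot13_pair from_str to_str)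

-- ===== LEMMAS AND PROOFS =====

-- B's fold over the triple state splits into three independent component folds
theorem pv_fold_split (l : List (Char × Char)) (a b : PySem.Set Char) (c : Bool) :
    l.foldl pvStepB (a, b, c) =
      (l.foldl (fun s p => if PySem.Chars.isalpha p.1 then PySem.Set.add s (PySem.Chars.lowerChar p.1) else s) a,
       l.foldl (fun s p => if PySem.Chars.isalpha p.2 then PySem.Set.add s (PySem.Chars.lowerChar p.2) else s) b,
       l.foldl (fun ok p => if PySem.Chars.isalpha p.1 && PySem.Chars.isalpha p.2 && (pvRot13 p.1 != p.2) then false else ok) c) := by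
  induction l generalizing a b c with
  | nil => rfl
  | cons x xs ih => simp [List.foldl_cons, pvStepB, ih]

-- a conditional-add fold is the add-fold over the filtered, mapped list
theorem pv_condAdd_eq (xs : List Char) (a : PySem.Set Char) :
    xs.foldl (fun s c => if PySem.Chars.isalpha c then PySem.Set.add s (PySem.Chars.lowerChar c) else s) a =
      ((xs.filter PySem.Chars.isalpha).map PySem.Chars.lowerChar).foldl PySem.Set.add a := by
  induction xs generalizing a with
  | nil => rfl
  | cons x xs ih =>
    by_cases h : PySem.Chars.isalpha x = true <;> simp [h, ih]

-- the fold over zip with a function reading only the first component is a fold over map fst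
theorem pv_zip_fst_fold (l : List (Char × Char)) (a : PySem.Set Char) :
    l.foldl (fun s p => if PySem.Chars.isalpha p.1 then PySem.Set.add s (PySem.Chars.lowerChar p.1) else s) a =
      (l.map Prod.fst).foldl (fun s c => if PySem.Chars.isalpha c then PySem.Set.add s (PySem.Chars.lowerChar c) else s) a := by
  rw [List.foldl_map]

theorem pv_zip_snd_fold (l : List (Char × Char)) (a : PySem.Set Char) :
    l.foldl (fun s p => if PySem.Chars.isalpha p.2 then PySem.Set.add s (PySem.Chars.lowerChar p.2) else s) a =
      (l.map Prod.snd).foldl (fun s c => if PySem.Chars.isalpha c then PySem.Set.add s (PySem.Chars.lowerChar c) else s) a := by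
  rw [List.foldl_map]

-- A's `all` body is the negation of B's kill condition
theorem pv_body_eq (p : Char × Char) :
    (if PySem.Chars.isalpha p.1 && PySem.Chars.isalpha p.2 then pvRot13 p.1 == p.2 else true) =
      !(PySem.Chars.isalpha p.1 && PySem.Chars.isalpha p.2 && (pvRot13 p.1 != p.2)) := by
  cases h1 : PySem.Chars.isalpha p.1 <;> cases h2 : PySem.Chars.isalpha p.2 <;>
    cases h3 : pvRot13 p.1 == p.2 <;> simp_all [bne]

-- the flag fold computes init && all
theorem pv_okFold_eq (l : List (Char × Char)) (c : Bool) :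
    l.foldl (fun ok p => if PySem.Chars.isalpha p.1 && PySem.Chars.isalpha p.2 && (pvRot13 p.1 != p.2) then false else ok) c =
      (c && l.all (fun p => if PySem.Chars.isalpha p.1 && PySem.Chars.isalpha p.2 then pvRot13 p.1 == p.2 else true)) := by
  induction l generalizing c with
  | nil => simp
  | cons x xs ih =>
    rw [List.foldl_cons, ih, List.all_cons, pv_body_eq x]
    cases hC : (PySem.Chars.isalpha x.1 && PySem.Chars.isalpha x.2 && (pvRot13 x.1 != x.2)) <;>
      simp [hC, Bool.and_left_comm, Bool.and_assoc]

-- ===== VERDICT (by name: the statement is the Claim_ definition above) =====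
theorem is_rot13_pair_spec : Claim_equal_is_rot13_pair := by
  intro f t _
  show is_rot13_pair f t = is_rot13_pair_alt f t
  unfold is_rot13_pair is_rot13_pair_alt
  set lf := f.toList
  set lt := t.toList
  by_cases hg : lf.length ≠ lt.length ∨ lf.length < 26
  · simp [hg]
  · simp only [hg, if_false]
    have hlen : lf.length = lt.length := by
      by_contra h; exact hg (Or.inl h)
    have hfst : (lf.zip lt).map Prod.fst = lf := List.map_fst_zip (le_of_eq hlen)
    have hsnd : (lf.zip lt).map Prod.snd = lt := List.map_snd_zip (ge_of_eq hlen)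
    rw [pv_fold_split, pv_zip_fst_fold, pv_zip_snd_fold, hfst, hsnd,
        pv_condAdd_eq, pv_condAdd_eq, pv_okFold_eq]
    simp only [Bool.true_and]
    unfold pvHasFull
    rw [PySem.Set.ofList_eq_foldl, PySem.Set.ofList_eq_foldl]
    cases hA : decide (26 ≤ (((lf.filter PySem.Chars.isalpha).map PySem.Chars.lowerChar).foldl PySem.Set.add []).length) <;>
    cases hB : decide (26 ≤ (((lt.filter PySem.Chars.isalpha).map PySem.Chars.lowerChar).foldl PySem.Set.add []).length) <;>
      simp_all
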